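-- pv_equiv track=rewrite | github.com/WilliamLozano/pythonlozano | Tareas/Tarea 10-05-2023/Ejercicio0.py | generar_listas_por_quintil
-- ===== SOURCE A (Python) =====
-- def generar_listas_por_quintil(poblacion, quintiles):
--     listas_quintiles = []
--     for i in range(len(quintiles) - 1):
--         quintil_actual = quintiles[i]
--         quintil_siguiente = quintiles[i + 1]
--         lista_quintil = [dato for dato in poblacion if quintil_actual <= dato < quintil_siguiente]
--         listas_quintiles.append(lista_quintil)
--     return listas_quintiles
-- ===== SOURCE B (Python) =====
-- def _bisect_left(a, x):
--     # binary search for the first index where x could be inserted keeping a sorted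
--     # (same loop as the standard library's bisect.bisect_left; this module imports nothing)
--     lo, hi = 0, len(a)
--     while lo < hi:
--         mid = (lo + hi) // 2
--         if a[mid] < x:
--             lo = mid + 1
--         else:
--             hi = mid
--     return lo
--
--
-- def generar_listas_por_quintil(poblacion, quintiles):
--     # Sort the indices of poblacion by value ONCE; every interval [lo, hi) then
--     # occupies one contiguous run of that sorted order, located by two binary
--     # searches, and re-sorting the run's indices restores original poblacion order.
--     orden = sorted(range(len(poblacion)), key=lambda i: poblacion[i])
--     vals = [poblacion[i] for i in orden]
--     res = []
--     for lo, hi in zip(quintiles, quintiles[1:]):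
--         a = _bisect_left(vals, lo)
--         b = _bisect_left(vals, hi)
--         res.append([poblacion[i] for i in sorted(orden[a:b])])
--     return res
-- ===== Notes on version B (the rewrite author's own statement) =====
-- stated objective: alternative
-- what changed: B sorts poblacion's indices by value once and locates each quintile interval as a contiguous run of that sorted order via two binary searches (hand-rolled bisect_left), re-sorting the run's indices to restore original order, instead of A's full filter pass over poblacion per interval.
import Mathlib
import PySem

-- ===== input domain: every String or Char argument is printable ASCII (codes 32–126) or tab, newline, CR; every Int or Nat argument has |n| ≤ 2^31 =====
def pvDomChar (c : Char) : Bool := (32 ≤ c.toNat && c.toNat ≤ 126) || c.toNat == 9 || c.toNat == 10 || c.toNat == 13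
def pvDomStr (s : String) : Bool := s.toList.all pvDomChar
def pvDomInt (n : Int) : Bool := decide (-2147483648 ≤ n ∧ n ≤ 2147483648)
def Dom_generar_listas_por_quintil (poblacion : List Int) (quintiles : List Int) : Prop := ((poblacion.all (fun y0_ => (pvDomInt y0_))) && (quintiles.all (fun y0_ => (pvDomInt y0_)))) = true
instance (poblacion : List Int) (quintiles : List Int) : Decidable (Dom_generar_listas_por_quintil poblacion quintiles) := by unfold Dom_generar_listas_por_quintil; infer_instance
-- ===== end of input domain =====

-- B sorts the index order of poblacion once and locates each interval as a contiguous run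
-- by two binary searches, instead of A's one filter pass over poblacion per interval.

-- ===== PORT A =====
-- A: for each consecutive pair of quintile bounds, filter the whole population.
-- quintiles[i] / quintiles[i+1]: the index is always in range (0 <= i < len-1),
-- so pyGetD with default 0 is exact here.
def generar_listas_por_quintil (poblacion : List Int) (quintiles : List Int) : List (List Int) :=
  (PySem.List.pyRange 0 ((quintiles.length : Int) - 1) 1).foldl
    (fun listas_quintiles i =>
      let quintil_actual := PySem.List.pyGetD quintiles i 0
      let quintil_siguiente := PySem.List.pyGetD quintiles (i + 1) 0
      let lista_quintil := poblacion.filter (fun dato => quintil_actual ≤ dato && dato < quintil_siguiente)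
      listas_quintiles ++ [lista_quintil]) []

-- ===== PORT B =====
-- B: sort the indices of poblacion by value once (orden, stable), take the sorted values
-- (vals); each interval [lo, hi) is the run vals[a:b] found by two binary searches
-- (Source B's _bisect_left is the standard library's bisect_left loop = PySem.List.bisectLeft);
-- re-sorting the run's indices restores the original poblacion order.
-- All indices are in [0, len), so pyGetD with default 0 is exact.
def generar_listas_por_quintil_alt (poblacion : List Int) (quintiles : List Int) : List (List Int) :=
  let orden := PySem.List.sorted (PySem.List.pyRange 0 (poblacion.length : Int) 1)
                 (fun i => PySem.List.pyGetD poblacion i 0)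
  let vals := orden.map (fun i => PySem.List.pyGetD poblacion i 0)
  (quintiles.zip quintiles.tail).foldl
    (fun res p =>
      let a := PySem.List.bisectLeft vals p.1
      let b := PySem.List.bisectLeft vals p.2
      res ++ [(PySem.List.sorted (PySem.List.slice orden (some (a : Int)) (some (b : Int))) (fun i => i)).map
                (fun i => PySem.List.pyGetD poblacion i 0)]) []

-- ===== PRECONDITION & SPEC =====
def Spec_generar_listas_por_quintil (poblacion : List Int) (quintiles : List Int) (out : List (List Int)) : Prop := out = generar_listas_por_quintil_alt poblacion quintiles
instance (poblacion : List Int) (quintiles : List Int) (out : List (List Int)) : Decidable (Spec_generar_listas_por_quintil poblacion quintiles out) := by unfold Spec_generar_listas_por_quintil; infer_instance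

-- ===== CLAIM (what is proved, stated in full; the proofs are below) =====
def Claim_equal_generar_listas_por_quintil : Prop := ∀ (poblacion : List Int) (quintiles : List Int), Dom_generar_listas_por_quintil poblacion quintiles → Spec_generar_listas_por_quintil poblacion quintiles (generar_listas_por_quintil poblacion quintiles)

-- ===== LEMMAS AND PROOFS =====

-- a filter whose predicate holds exactly on positions a..b-1 is a drop/take
theorem filter_positional {α : Type} (p : α → Bool) :
    ∀ (l : List α) (a b : Nat),
      (∀ (j : Nat) (hj : j < l.length), p l[j] = decide (a ≤ j ∧ j < b)) →
      l.filter p = (l.drop a).take (b - a) := by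
  intro l
  induction l with
  | nil => intro a b _; simp
  | cons x l ih =>
    intro a b h
    have h0 : p x = decide (a ≤ 0 ∧ 0 < b) := h 0 (by simp)
    cases a with
    | zero =>
      cases b with
      | zero =>
        have hx : p x = false := by simpa using h0
        have hl : l.filter p = (l.drop 0).take 0 := by
          apply ih 0 0
          intro j hj
          have := h (j + 1) (by simpa using Nat.succ_lt_succ hj)
          simpa using this
        simp [hx] at hl ⊢
        exact hl
      | succ s =>
        have hx : p x = true := by simpa using h0
        have hl : l.filter p = (l.drop 0).take s := by
          apply ih 0 s
          intro j hj
          have := h (j + 1) (by simpa using Nat.succ_lt_succ hj)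
          rw [List.getElem_cons_succ] at this
          rw [this]
          simp only [decide_eq_decide]
          omega
        simp [hx] at hl ⊢
        exact hl
    | succ t =>
      have hx : p x = false := by simpa using h0
      have hl : l.filter p = (l.drop t).take (b - 1 - t) := by
        apply ih t (b - 1)
        intro j hj
        have := h (j + 1) (by simpa using Nat.succ_lt_succ hj)
        rw [List.getElem_cons_succ] at this
        rw [this]
        simp only [decide_eq_decide]
        omega
      have hbt : b - (t + 1) = b - 1 - t := by omega
      simp [hx, hbt]
      exact hl
-- mapping positions back to values turns a positional filter of range into a value filter
theorem filter_range_map_getD (P : Int → Bool) :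
    ∀ (l : List Int),
      ((List.range l.length).filter (fun k => P (l.getD k 0))).map (fun k => l.getD k 0)
        = l.filter P := by
  intro l
  induction l with
  | nil => simp
  | cons x l ih =>
    rw [show (x :: l).length = l.length + 1 from rfl, List.range_succ_eq_map, List.filter_cons]
    have e1 : ((fun k => P ((x :: l).getD k 0)) ∘ Nat.succ) = fun k => P (l.getD k 0) := by
      funext k; simp
    have e2 : ((fun k => (x :: l).getD k 0) ∘ Nat.succ) = fun k => l.getD k 0 := by
      funext k; simp
    by_cases hx : P x
    · rw [if_pos (by simpa using hx)]
      rw [List.map_cons, List.filter_map, List.map_map, e1, e2, ih]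
      simp [hx]
    · rw [if_neg (by simpa using hx)]
      rw [List.filter_map, List.map_map, e1, e2, ih]
      simp [hx]

-- the pyRange version of the previous lemma, with pyGetD indexing
theorem filter_pyRange_map (l : List Int) (P : Int → Bool) :
    ((PySem.List.pyRange 0 (l.length : Int) 1).filter
        (fun i => P (PySem.List.pyGetD l i 0))).map (fun i => PySem.List.pyGetD l i 0)
      = l.filter P := by
  rw [PySem.List.pyRange_one]
  have hn : (((l.length : Int) - 0)).toNat = l.length := by omega
  rw [hn]
  rw [List.filter_map, List.map_map]
  have hf : ((fun i => PySem.List.pyGetD l i 0) ∘ fun k : Nat => (0 : Int) + (k : Int))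
      = fun k : Nat => l.getD k 0 := by
    funext k
    simp [PySem.List.pyGetD_natCast]
  rw [hf]
  have hp : ((fun i => P (PySem.List.pyGetD l i 0)) ∘ fun k : Nat => (0 : Int) + (k : Int))
      = fun k : Nat => P (l.getD k 0) := by
    funext k
    simp [PySem.List.pyGetD_natCast]
  rw [hp]
  exact filter_range_map_getD P l

-- one interval: B's sorted slice of the index order, mapped back to values,
-- is exactly A's filter of poblacion
theorem pair_eq (poblacion : List Int) (lo hi : Int) :
    ((PySem.List.sorted
        (PySem.List.slice
          (PySem.List.sorted (PySem.List.pyRange 0 (poblacion.length : Int) 1)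
            (fun i => PySem.List.pyGetD poblacion i 0))
          (some ((PySem.List.bisectLeft
            ((PySem.List.sorted (PySem.List.pyRange 0 (poblacion.length : Int) 1)
              (fun i => PySem.List.pyGetD poblacion i 0)).map
              (fun i => PySem.List.pyGetD poblacion i 0)) lo : Nat) : Int))
          (some ((PySem.List.bisectLeft
            ((PySem.List.sorted (PySem.List.pyRange 0 (poblacion.length : Int) 1)
              (fun i => PySem.List.pyGetD poblacion i 0)).map
              (fun i => PySem.List.pyGetD poblacion i 0)) hi : Nat) : Int)))
        (fun i => i)).map (fun i => PySem.List.pyGetD poblacion i 0))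
      = poblacion.filter (fun dato => lo ≤ dato && dato < hi) := by
  set key : Int → Int := fun i => PySem.List.pyGetD poblacion i 0 with hkey
  set R := PySem.List.pyRange 0 (poblacion.length : Int) 1 with hR
  set orden := PySem.List.sorted R key with horden
  set vals := orden.map key with hvals
  set a := PySem.List.bisectLeft vals lo with ha
  set b := PySem.List.bisectLeft vals hi with hb
  have hsorted : vals.Pairwise (· ≤ ·) := by
    rw [hvals, horden]; exact PySem.List.sorted_map_key_pairwise R key
  obtain ⟨haLen, haLt, haGe⟩ := PySem.List.bisectLeft_spec vals lo hsorted
  obtain ⟨hbLen, hbLt, hbGe⟩ := PySem.List.bisectLeft_spec vals hi hsorted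
  have hlen : vals.length = orden.length := by rw [hvals]; simp
  -- the interval predicate holds on orden exactly at positions a..b-1
  have hpos : ∀ (j : Nat) (hj : j < orden.length),
      ((fun i => lo ≤ key i && key i < hi) orden[j]) = decide (a ≤ j ∧ j < b) := by
    intro j hj
    have hjv : j < vals.length := by omega
    have hv : vals[j]'hjv = key (orden[j]'hj) := by simp [hvals]
    show (decide (lo ≤ key (orden[j]'hj)) && decide (key (orden[j]'hj) < hi)) = decide (a ≤ j ∧ j < b)
    rw [← hv]
    by_cases haj : a ≤ j
    · by_cases hjb : j < b
      · have h1 : lo ≤ vals[j] := haGe j hjv (by rw [← ha]; omega)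
        have h2 : vals[j] < hi := hbLt j hjv (by rw [← hb]; omega)
        simp [h1, h2, haj, hjb]
      · have h2 : hi ≤ vals[j] := hbGe j hjv (by omega)
        have : ¬ (vals[j] < hi) := by omega
        simp [this, haj, hjb]
    · have h1 : vals[j] < lo := haLt j hjv (by omega)
      have : ¬ (lo ≤ vals[j]) := by omega
      simp [this, haj]
  have hfil : orden.filter (fun i => lo ≤ key i && key i < hi)
      = (orden.drop a).take (b - a) := filter_positional _ orden a b hpos
  have hslice : PySem.List.slice orden (some (a : Int)) (some (b : Int))
      = (orden.drop a).take (b - a) := PySem.List.slice_natCast orden a b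
  -- the sorted run is the filtered range
  have hRperm : orden.Perm R := PySem.List.sorted_perm R key false
  have hperm : (R.filter (fun i => lo ≤ key i && key i < hi)).Perm
      (PySem.List.slice orden (some (a : Int)) (some (b : Int))) := by
    rw [hslice, ← hfil]
    exact (hRperm.filter _).symm
  have hpw : (R.filter (fun i => lo ≤ key i && key i < hi)).Pairwise (· < ·) := by
    rw [hR]
    exact (PySem.List.pairwise_lt_pyRange_one 0 (poblacion.length : Int)).filter _
  have hs : PySem.List.sorted (PySem.List.slice orden (some (a : Int)) (some (b : Int)))
      (fun i => i) = R.filter (fun i => lo ≤ key i && key i < hi) :=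
    PySem.List.sorted_eq_of_perm_of_pairwise_lt _ _ _ hperm hpw
  rw [hs, hR, hkey]
  exact filter_pyRange_map poblacion (fun d => lo ≤ d && d < hi)

-- indexing consecutive pairs equals zipping with the tail (A-side shape)
theorem range_pair_eq_zip_tail (q : List Int) (H : Int → Int → List Int) :
    (List.range (q.length - 1)).map
        (fun (k : Nat) => H (PySem.List.pyGetD q ((k : Int)) 0) (PySem.List.pyGetD q ((k : Int) + 1) 0))
      = (q.zip q.tail).map (fun p => H p.1 p.2) := by
  apply List.ext_getElem
  · simp
  · intro k h1 h2
    have hk : k < q.length - 1 := by simpa using h1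
    have hk1 : k + 1 < q.length := by omega
    have e1 : PySem.List.pyGetD q (k : Int) 0 = q[k] := by
      rw [PySem.List.pyGetD_natCast]; exact List.getD_eq_getElem q 0 (by omega)
    have e2 : PySem.List.pyGetD q ((k : Int) + 1) 0 = q[k + 1] := by
      have hc : ((k : Int) + 1) = ((k + 1 : Nat) : Int) := by push_cast; ring
      rw [hc, PySem.List.pyGetD_natCast]; exact List.getD_eq_getElem q 0 hk1
    simp only [List.getElem_map, List.getElem_range, List.getElem_zip, e1, e2, List.getElem_tail]

-- ===== VERDICT (by name: the statement is the Claim_ definition above) =====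
theorem generar_listas_por_quintil_spec : Claim_equal_generar_listas_por_quintil := by
  intro poblacion quintiles _
  unfold Spec_generar_listas_por_quintil generar_listas_por_quintil generar_listas_por_quintil_alt
  simp only []
  rw [PySem.List.foldl_append_singleton_eq_map, PySem.List.foldl_append_singleton_eq_map]
  -- A's side becomes a map over zipped boundary pairs
  rw [PySem.List.pyRange_one]
  have hlen : (((quintiles.length : Int) - 1) - 0).toNat = quintiles.length - 1 := by omega
  rw [hlen, List.map_map]
  have hA := range_pair_eq_zip_tail quintiles
    (fun lo hi => poblacion.filter (fun dato => lo ≤ dato && dato < hi))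
  simp only [Function.comp_def, Int.zero_add] at hA ⊢
  rw [hA]
  -- both sides are maps over the same pair list; compare pointwise
  apply List.map_congr_left
  intro p _
  exact (pair_eq poblacion p.1 p.2).symm
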